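-- pv_equiv track=rewrite | github.com/simsekhalit/CookSheets-Algorithms | problems/hackerrank-sherlock-and-anagrams/solution.py | sherlockAndAnagrams
-- ===== SOURCE A (Python) =====
-- from collections import Counter
--
-- def sherlockAndAnagrams(s):
--     counter = Counter()
--     answer = 0
--
--     # Iterate over the string.
--     for i in range(len(s)):
--         add = 0
--         mul = 1
--
--         # Iterate over the substrings of each length.
--         for j in range(i, len(s)):
--
--             # Sum and multiplication of each characters in the substring yields the signature
--             add += ord(s[j])
--             mul *= ord(s[j])
--             signature = (add, mul)
--
--             # Store each signature in the Counter
--             counter[signature] += 1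
--
--     # For each value in the Counter find the number of pairs with the formula: n * (n - 1) / 2
--     # Then add the number of pairs to the answer
--     for count in counter.values():
--         answer += count * (count - 1) // 2
--
--     return answer
-- ===== SOURCE B (Python) =====
-- def sherlockAndAnagrams(s):
--     # Length-major sliding window: for each substring length, slide a window
--     # across the string maintaining its (sum, product) signature incrementally,
--     # and count pairs online (each window adds the number of equal signatures
--     # seen so far) instead of a Counter plus an n*(n-1)//2 pass.
--     n = len(s)
--     seen = {}
--     answer = 0
--     for length in range(1, n + 1):
--         wsum = 0
--         wprod = 1
--         for k in range(length):
--             wsum += ord(s[k])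
--             wprod *= ord(s[k])
--         sig = (wsum, wprod)
--         answer += seen.get(sig, 0)
--         seen[sig] = seen.get(sig, 0) + 1
--         for start in range(1, n - length + 1):
--             wsum += ord(s[start + length - 1]) - ord(s[start - 1])
--             wprod = wprod * ord(s[start + length - 1]) // ord(s[start - 1])
--             sig = (wsum, wprod)
--             answer += seen.get(sig, 0)
--             seen[sig] = seen.get(sig, 0) + 1
--     return answer
-- ===== Notes on version B (the rewrite author's own statement) =====
-- stated objective: alternative
-- what changed: B traverses substrings length-major with a sliding window that maintains the (sum, product) signature by adding the entering character and removing the leaving one (exact division), and counts pairs online by crediting each window with the number of equal signatures seen so far, instead of A's start-major extension loops with a Counter and a final n*(n-1)//2 pass.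
import Mathlib
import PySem

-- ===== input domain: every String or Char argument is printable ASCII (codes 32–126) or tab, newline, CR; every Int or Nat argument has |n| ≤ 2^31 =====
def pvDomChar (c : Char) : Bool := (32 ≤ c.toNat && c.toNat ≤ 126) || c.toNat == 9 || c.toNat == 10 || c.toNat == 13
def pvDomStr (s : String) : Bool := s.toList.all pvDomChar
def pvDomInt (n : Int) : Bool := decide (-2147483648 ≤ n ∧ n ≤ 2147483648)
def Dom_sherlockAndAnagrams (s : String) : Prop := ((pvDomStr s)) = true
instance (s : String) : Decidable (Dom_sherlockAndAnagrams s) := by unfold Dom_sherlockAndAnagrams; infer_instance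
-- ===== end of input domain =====

-- B traverses length-major with a sliding window (signature maintained by adding/removing
-- an end character) and counts matching pairs online, instead of A's start-major extension
-- loop with a Counter and a final n*(n-1)//2 pass (objective: alternative, same asymptotics).


-- ===== PORT A =====
def sherlockAndAnagrams (s : String) : Int :=
  let counter : PySem.Dict (Int × Int) Int :=
    (PySem.List.pyRange 0 (PySem.Str.len s) 1).foldl
      (fun (counter : PySem.Dict (Int × Int) Int) i =>
        ((PySem.List.pyRange i (PySem.Str.len s) 1).foldl
          (fun (st : Int × Int × PySem.Dict (Int × Int) Int) j =>
            -- s[j] is always in range in this loop, so the `.getD ' '` default is never used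
            let o : Int := (((PySem.Str.pyGet? s j).getD ' ').toNat : Int)
            let add := st.1 + o
            let mul := st.2.1 * o
            let signature := (add, mul)
            (add, mul, st.2.2.modify signature 0 (· + 1)))
          (0, 1, counter)).2.2)
      PySem.Dict.empty
  counter.values.foldl (fun answer count => answer + PySem.Int.floordiv (count * (count - 1)) 2) 0

-- ===== PORT B =====
def sherlockAndAnagrams_alt (s : String) : Int :=
  let n := PySem.Str.len s
  let res :=
    (PySem.List.pyRange 1 (n + 1) 1).foldl
      (fun (st : PySem.Dict (Int × Int) Int × Int) length =>
        let w := (PySem.List.pyRange 0 length 1).foldl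
          (fun (w : Int × Int) k =>
            -- s[k] is in range here, so the `.getD ' '` default is never used
            let o : Int := (((PySem.Str.pyGet? s k).getD ' ').toNat : Int)
            (w.1 + o, w.2 * o)) (0, 1)
        let sig := (w.1, w.2)
        let answer := st.2 + st.1.getD sig 0
        let seen := st.1.insert sig (st.1.getD sig 0 + 1)
        let q :=
          (PySem.List.pyRange 1 (n - length + 1) 1).foldl
            (fun (q : Int × Int × PySem.Dict (Int × Int) Int × Int) start =>
              -- both indices are in range here, so the `.getD ' '` defaults are never used
              let oin : Int := (((PySem.Str.pyGet? s (start + length - 1)).getD ' ').toNat : Int)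
              let oout : Int := (((PySem.Str.pyGet? s (start - 1)).getD ' ').toNat : Int)
              let wsum := q.1 + oin - oout
              let wprod := PySem.Int.floordiv (q.2.1 * oin) oout
              let sig := (wsum, wprod)
              let answer := q.2.2.2 + q.2.2.1.getD sig 0
              let seen := q.2.2.1.insert sig (q.2.2.1.getD sig 0 + 1)
              (wsum, wprod, seen, answer))
            (w.1, w.2, seen, answer)
        (q.2.2.1, q.2.2.2))
      (PySem.Dict.empty, 0)
  res.2

-- ===== PRECONDITION & SPEC =====
def Spec_sherlockAndAnagrams (s : String) (out : Int) : Prop := out = sherlockAndAnagrams_alt s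
instance (s : String) (out : Int) : Decidable (Spec_sherlockAndAnagrams s out) := by unfold Spec_sherlockAndAnagrams; infer_instance

-- ===== CLAIM (what is proved, stated in full; the proofs are below) =====
def Claim_equal_sherlockAndAnagrams : Prop := ∀ (s : String), Dom_sherlockAndAnagrams s → Spec_sherlockAndAnagrams s (sherlockAndAnagrams s)

-- ===== LEMMAS AND PROOFS =====

/-- Ordinals of the characters, as integers. -/
def pvOs (cs : List Char) : List Int := cs.map (fun c => (c.toNat : Int))

/-- Prefix sum of the ordinals. -/
def pvPS (os : List Int) (k : Nat) : Int := (os.take k).sum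

/-- Prefix product of the ordinals. -/
def pvPP (os : List Int) (k : Nat) : Int := (os.take k).prod

/-- The signature of the substring spanning positions `i … j`. -/
def pvKey (os : List Int) (i j : Nat) : Int × Int :=
  (pvPS os (j + 1) - pvPS os i, pvPP os (j + 1) / pvPP os i)

/-- One counter update (A's loop body effect on the dict). -/
def pvStep (os : List Int) (i j : Nat) (d : PySem.Dict (Int × Int) Int) : PySem.Dict (Int × Int) Int :=
  d.modify (pvKey os i j) 0 (· + 1)

/-- The counter A builds. -/
def pvRefC (os : List Int) : PySem.Dict (Int × Int) Int :=
  (List.range os.length).foldl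
    (fun d i => (List.range (os.length - i)).foldl (fun d k => pvStep os i (i + k) d) d)
    PySem.Dict.empty

/-- n*(n-1)//2 as both programs compute it. -/
def pvC2 (c : Int) : Int := PySem.Int.floordiv (c * (c - 1)) 2

/-- A's enumeration order of the substring index pairs: start-major. -/
def pvPairsA (n : Nat) : List (Nat × Nat) :=
  (List.range n).flatMap (fun i => (List.range (n - i)).map (fun k => (i, i + k)))

/-- B's enumeration order: gap-major (substring length minus one). -/
def pvPairsB (n : Nat) : List (Nat × Nat) :=
  (List.range n).flatMap (fun d => (List.range (n - d)).map (fun st => (st, st + d)))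

/-- Signatures of a pair list. -/
def pvKeys (os : List Int) (ps : List (Nat × Nat)) : List (Int × Int) :=
  ps.map (fun p => pvKey os p.1 p.2)

/-- Number of unordered pairs of equal signatures, as an order-independent sum. -/
def pvNN (ks : List (Int × Int)) : Int :=
  ∑ k ∈ ks.toFinset, pvC2 ((ks.count k : Int))

/-- B's online pair-counting step: credit the current signature with the number of
    earlier equal ones, then record it. -/
def pvStepB (p : PySem.Dict (Int × Int) Int × Int) (k : Int × Int) :
    PySem.Dict (Int × Int) Int × Int :=
  (p.1.insert k (p.1.getD k 0 + 1), p.2 + p.1.getD k 0)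

lemma pvOs_pos (s : String) (h : Dom_sherlockAndAnagrams s) : ∀ x ∈ pvOs s.toList, 0 < x := by
  intro x hx
  simp only [pvOs, List.mem_map] at hx
  obtain ⟨c, hc, rfl⟩ := hx
  have := List.all_eq_true.mp h c hc
  simp [pvDomChar] at this
  omega

lemma pvPP_pos (os : List Int) (hpos : ∀ x ∈ os, 0 < x) (k : Nat) : 0 < pvPP os k := by
  apply List.prod_pos
  intro x hx
  exact hpos x (List.mem_of_mem_take hx)

lemma pvPS_succ (os : List Int) (j : Nat) (h : j < os.length) :
    pvPS os (j + 1) = pvPS os j + os[j] := by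
  rw [pvPS, pvPS, List.take_add_one, List.sum_append, List.getElem?_eq_getElem h]
  simp

lemma pvPP_succ (os : List Int) (j : Nat) (h : j < os.length) :
    pvPP os (j + 1) = pvPP os j * os[j] := by
  rw [pvPP, pvPP, List.take_add_one, List.prod_append, List.getElem?_eq_getElem h]
  simp

lemma pvPP_dvd (os : List Int) (i k : Nat) (h : i ≤ k) : pvPP os i ∣ pvPP os k := by
  refine ⟨((os.take k).drop i).prod, ?_⟩
  unfold pvPP
  conv_lhs => rw [← List.take_append_drop i (os.take k)]
  rw [List.prod_append, List.take_take, min_eq_left h]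

lemma pvQuot_step (os : List Int) (hpos : ∀ x ∈ os, 0 < x) (i j : Nat) (hij : i ≤ j)
    (hj : j < os.length) :
    (pvPP os j / pvPP os i) * os[j] = pvPP os (j + 1) / pvPP os i := by
  obtain ⟨q, hq⟩ := pvPP_dvd os i j hij
  have hb : 0 < pvPP os i := pvPP_pos os hpos i
  rw [pvPP_succ os j hj, hq, Int.mul_ediv_cancel_left _ hb.ne', mul_assoc,
    Int.mul_ediv_cancel_left _ hb.ne']

/-- Removing the leftmost character of a window by exact division. -/
lemma pvQuot_shrink (os : List Int) (hpos : ∀ x ∈ os, 0 < x) (i k : Nat) (hik : i + 1 ≤ k)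
    (hi : i < os.length) :
    (pvPP os k / pvPP os i) / os[i] = pvPP os k / pvPP os (i + 1) := by
  obtain ⟨q, hq⟩ := pvPP_dvd os (i + 1) k hik
  have hb : 0 < pvPP os i := pvPP_pos os hpos i
  have hx : 0 < os[i] := hpos _ (List.getElem_mem hi)
  rw [hq, pvPP_succ os i hi,
    show pvPP os (i) * os[i] * q = pvPP os i * (os[i] * q) by ring,
    Int.mul_ediv_cancel_left _ hb.ne', Int.mul_ediv_cancel_left _ hx.ne',
    ← mul_assoc, Int.mul_ediv_cancel_left _ (mul_pos hb hx).ne']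

-- ---------- A-side ----------

/-- A's inner loop: running accumulators are prefix differences/quotients, the dict
    evolves by `pvStep`. -/
lemma pvInnerA (s : String) (hpos : ∀ x ∈ pvOs s.toList, 0 < x) (i : Nat)
    (d : PySem.Dict (Int × Int) Int) :
    ∀ m, i + m ≤ s.toList.length →
    (PySem.List.pyRange (i : Int) ((i + m : Nat) : Int) 1).foldl
      (fun (st : Int × Int × PySem.Dict (Int × Int) Int) j =>
        let o : Int := (((PySem.Str.pyGet? s j).getD ' ').toNat : Int)
        let add := st.1 + o
        let mul := st.2.1 * o
        let signature := (add, mul)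
        (add, mul, st.2.2.modify signature 0 (· + 1)))
      (0, 1, d)
    = (pvPS (pvOs s.toList) (i + m) - pvPS (pvOs s.toList) i,
       pvPP (pvOs s.toList) (i + m) / pvPP (pvOs s.toList) i,
       (List.range m).foldl (fun d k => pvStep (pvOs s.toList) i (i + k) d) d) := by
  intro m
  induction m with
  | zero =>
    intro _
    have h0 : 0 < pvPP (pvOs s.toList) i := pvPP_pos _ hpos i
    simp [Int.ediv_self h0.ne']
  | succ m ih =>
    intro hm
    have hm' : i + m ≤ s.toList.length := by omega
    have hcast : ((i + (m + 1) : Nat) : Int) = ((i + m : Nat) : Int) + 1 := by push_cast; ring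
    have hle : (i : Int) ≤ ((i + m : Nat) : Int) := by push_cast; omega
    rw [hcast, PySem.List.pyRange_one_succ_right hle, List.foldl_append, ih hm']
    have hjlt : i + m < s.toList.length := by omega
    have hoslen : (pvOs s.toList).length = s.toList.length := by simp [pvOs]
    have hjlt' : i + m < (pvOs s.toList).length := by omega
    have hget : (PySem.Str.pyGet? s ((i + m : Nat) : Int)).getD ' ' = s.toList[i + m] := by
      have : PySem.Str.pyGet? s ((i + m : Nat) : Int) = PySem.List.pyGet? s.toList ((i + m : Nat) : Int) := rfl
      rw [this, PySem.List.pyGet?_natCast, List.getElem?_eq_getElem hjlt]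
      rfl
    have hord : ((s.toList[i + m]).toNat : Int) = (pvOs s.toList)[i + m]'hjlt' := by
      simp [pvOs]
    simp only [List.foldl_cons, List.foldl_nil, hget, hord]
    have hadd : pvPS (pvOs s.toList) (i + m) - pvPS (pvOs s.toList) i + (pvOs s.toList)[i + m]'hjlt'
        = pvPS (pvOs s.toList) (i + m + 1) - pvPS (pvOs s.toList) i := by
      rw [pvPS_succ _ _ hjlt']; ring
    have hmul : pvPP (pvOs s.toList) (i + m) / pvPP (pvOs s.toList) i * (pvOs s.toList)[i + m]'hjlt'
        = pvPP (pvOs s.toList) (i + m + 1) / pvPP (pvOs s.toList) i :=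
      pvQuot_step _ hpos i (i + m) (by omega) hjlt'
    rw [List.range_succ, List.foldl_append, List.foldl_cons, List.foldl_nil]
    simp only [hadd, hmul]
    rfl

/-- A's counter is the `Counter` of its signature list. -/
lemma pvRefC_counter (os : List Int) :
    pvRefC os = PySem.Dict.counter (pvKeys os (pvPairsA os.length)) := by
  rw [PySem.Dict.counter_eq_foldl, pvKeys, pvPairsA, List.foldl_map, List.foldl_flatMap, pvRefC]
  apply PySem.List.foldl_congr_mem
  intro d i _
  rw [List.foldl_map]
  rfl

-- ---------- counting lemmas ----------

/-- Sum over a Python set of distinct keys is a Finset sum. -/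
lemma pvSum_ofList (f : (Int × Int) → Int) (ks : List (Int × Int)) :
    ((PySem.Set.ofList ks).map f).sum = ∑ k ∈ ks.toFinset, f k := by
  have h1 : (PySem.Set.ofList ks).toFinset = ks.toFinset := by
    ext x
    simp [PySem.Set.mem_ofList]
  rw [← h1, List.sum_toFinset f (PySem.Set.nodup_ofList ks)]

lemma pvC2_succ (c : Int) : pvC2 (c + 1) = pvC2 c + c := by
  unfold pvC2
  rw [PySem.Int.floordiv_eq_ediv_of_pos (by norm_num), PySem.Int.floordiv_eq_ediv_of_pos (by norm_num),
    show (c + 1) * (c + 1 - 1) = c * (c - 1) + c * 2 by ring,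
    Int.add_mul_ediv_right _ _ (by norm_num)]

lemma pvNN_append (ks : List (Int × Int)) (k : Int × Int) :
    pvNN (ks ++ [k]) = pvNN ks + (ks.count k : Int) := by
  unfold pvNN
  have hf : (ks ++ [k]).toFinset = insert k ks.toFinset := by simp
  have hc : ∀ x, (ks ++ [k]).count x = ks.count x + if x = k then 1 else 0 := by
    intro x
    rw [List.count_append]
    by_cases hx : x = k
    · subst hx; simp
    · have h0 : List.count x [k] = 0 := List.count_eq_zero.mpr (by simpa using hx)
      rw [if_neg hx]
      omega
  have hck : (ks ++ [k]).count k = ks.count k + 1 := by rw [hc]; simp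
  rw [hf, Finset.sum_eq_sum_diff_singleton_add (Finset.mem_insert_self k ks.toFinset),
    Finset.insert_sdiff_of_mem _ (Finset.mem_singleton_self k)]
  have hcongr : ∀ x ∈ ks.toFinset \ {k}, pvC2 (((ks ++ [k]).count x : Int)) = pvC2 ((ks.count x : Int)) := by
    intro x hx
    have hxk : x ≠ k := by
      simp only [Finset.mem_sdiff, Finset.mem_singleton] at hx
      exact hx.2
    rw [hc x, if_neg hxk]
    norm_num
  rw [Finset.sum_congr rfl hcongr, hck]
  by_cases hk : k ∈ ks.toFinset
  · rw [Finset.sum_eq_sum_diff_singleton_add hk (fun x => pvC2 ((ks.count x : Int)))]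
    push_cast [pvC2_succ]
    ring
  · have h0 : ks.count k = 0 := by
      rw [← List.toFinset_coe] at hk
      simpa using List.count_eq_zero_of_not_mem (by simpa using hk)
    have hd : ks.toFinset \ {k} = ks.toFinset :=
      Finset.sdiff_eq_self_of_disjoint (by simpa using hk)
    rw [hd, h0]
    have h1 : pvC2 (((0 + 1 : Nat) : Int)) = 0 := by decide
    rw [h1]
    simp

/-- The Counter route and the online route count the same quantity. -/
lemma pvCounter_sum (ks : List (Int × Int)) :
    ((PySem.Dict.counter ks).values.map pvC2).sum = pvNN ks := by
  unfold pvNN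
  rw [show (PySem.Dict.counter ks).values = (PySem.Dict.counter ks).items.map (·.2) from rfl,
    PySem.Dict.items_counter, List.map_map, List.map_map]
  exact pvSum_ofList (fun k => pvC2 ((ks.count k : Int))) ks

lemma pvOnl (ks : List (Int × Int)) :
    ks.foldl pvStepB (PySem.Dict.empty, 0)
      = (ks.foldl (fun d k => d.insert k (d.getD k 0 + 1)) PySem.Dict.empty, pvNN ks) := by
  induction ks using List.reverseRecOn with
  | nil => simp [pvNN]
  | append_singleton t k ih =>
    rw [List.foldl_append, List.foldl_append, ih]
    simp only [List.foldl_cons, List.foldl_nil, pvStepB, pvNN_append,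
      PySem.Dict.getD_foldl_insert_add_one, PySem.Dict.getD_empty]
    norm_num

/-- `pvNN` only depends on the multiset of signatures. -/
lemma pvNN_perm {ks ks' : List (Int × Int)} (h : ks.Perm ks') : pvNN ks = pvNN ks' := by
  unfold pvNN
  rw [List.toFinset_eq_of_perm ks ks' h]
  exact Finset.sum_congr rfl (fun x _ => by rw [h.count_eq])

lemma pvMem_pairsA (n : Nat) (p : Nat × Nat) :
    p ∈ pvPairsA n ↔ p.1 ≤ p.2 ∧ p.2 < n := by
  simp only [pvPairsA, List.mem_flatMap, List.mem_map, List.mem_range]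
  constructor
  · rintro ⟨i, hi, k, hk, rfl⟩
    simp only []
    omega
  · rintro ⟨h1, h2⟩
    obtain ⟨a, b⟩ := p
    simp only [] at h1 h2
    exact ⟨a, by omega, ⟨b - a, by omega, by rw [Nat.add_sub_cancel' h1]⟩⟩

lemma pvMem_pairsB (n : Nat) (p : Nat × Nat) :
    p ∈ pvPairsB n ↔ p.1 ≤ p.2 ∧ p.2 < n := by
  simp only [pvPairsB, List.mem_flatMap, List.mem_map, List.mem_range]
  constructor
  · rintro ⟨d, hd, st, hst, rfl⟩
    simp only []
    omega
  · rintro ⟨h1, h2⟩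
    obtain ⟨a, b⟩ := p
    simp only [] at h1 h2
    exact ⟨b - a, by omega, ⟨a, by omega, by rw [Nat.add_sub_cancel' h1]⟩⟩

lemma pvNodup_pairsA (n : Nat) : (pvPairsA n).Nodup := by
  rw [pvPairsA, List.nodup_flatMap]
  refine ⟨fun i _ => ?_, ?_⟩
  · exact List.Nodup.map (fun a b h => by simpa using h) List.nodup_range
  · refine List.Pairwise.imp ?_ List.pairwise_lt_range
    intro a b hab p hpa hpb
    simp only [List.mem_map, List.mem_range] at hpa hpb
    obtain ⟨k1, _, rfl⟩ := hpa
    obtain ⟨k2, _, h2⟩ := hpb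
    have : a = b := by
      have := congrArg Prod.fst h2
      simpa using this.symm
    omega

lemma pvNodup_pairsB (n : Nat) : (pvPairsB n).Nodup := by
  rw [pvPairsB, List.nodup_flatMap]
  refine ⟨fun d _ => ?_, ?_⟩
  · exact List.Nodup.map (fun a b h => by simpa using h) List.nodup_range
  · refine List.Pairwise.imp ?_ List.pairwise_lt_range
    intro a b hab p hpa hpb
    simp only [List.mem_map, List.mem_range] at hpa hpb
    obtain ⟨s1, _, rfl⟩ := hpa
    obtain ⟨s2, _, h2⟩ := hpb
    have h1 := congrArg Prod.fst h2
    have h2' := congrArg Prod.snd h2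
    simp only [] at h1 h2'
    omega

lemma pvPairs_perm (n : Nat) : (pvPairsA n).Perm (pvPairsB n) := by
  refine (List.perm_ext_iff_of_nodup (pvNodup_pairsA n) (pvNodup_pairsB n)).mpr ?_
  intro p
  rw [pvMem_pairsA, pvMem_pairsB]

lemma pvA_eq (s : String) (h : Dom_sherlockAndAnagrams s) :
    sherlockAndAnagrams s = pvNN (pvKeys (pvOs s.toList) (pvPairsA s.toList.length)) := by
  have hpos := pvOs_pos s h
  unfold sherlockAndAnagrams
  rw [PySem.Str.len_eq, PySem.List.pyRange_zero_natCast, List.foldl_map]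
  have hcong : (List.range s.toList.length).foldl
      (fun (counter : PySem.Dict (Int × Int) Int) (i : Nat) =>
        ((PySem.List.pyRange ((i : Nat) : Int) ((s.toList.length : Nat) : Int) 1).foldl
          (fun (st : Int × Int × PySem.Dict (Int × Int) Int) j =>
            let o : Int := (((PySem.Str.pyGet? s j).getD ' ').toNat : Int)
            let add := st.1 + o
            let mul := st.2.1 * o
            let signature := (add, mul)
            (add, mul, st.2.2.modify signature 0 (· + 1)))
          (0, 1, counter)).2.2)
      PySem.Dict.empty
      = pvRefC (pvOs s.toList) := by
    unfold pvRefC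
    have hlen : (pvOs s.toList).length = s.toList.length := by simp [pvOs]
    rw [hlen]
    apply PySem.List.foldl_congr_mem
    intro acc i hi
    have hi' : i < s.toList.length := List.mem_range.mp hi
    have hsplit : ((s.toList.length : Nat) : Int) = ((i + (s.toList.length - i) : Nat) : Int) := by
      push_cast; omega
    rw [hsplit, pvInnerA s hpos i acc (s.toList.length - i) (by omega)]
  rw [hcong, PySem.List.foldl_add, pvRefC_counter]
  have hlen : (pvOs s.toList).length = s.toList.length := by simp [pvOs]
  rw [hlen]
  have := pvCounter_sum (pvKeys (pvOs s.toList) (pvPairsA s.toList.length))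
  rw [show (fun (count : Int) => PySem.Int.floordiv (count * (count - 1)) 2) = pvC2 from rfl, this]
  ring

-- ---------- B-side ----------

lemma pvOrd (s : String) (k : Nat) (h : k < (pvOs s.toList).length) :
    (((PySem.Str.pyGet? s ((k : Nat) : Int)).getD ' ').toNat : Int) = (pvOs s.toList)[k] := by
  have hk : k < s.toList.length := by
    rw [pvOs, List.length_map] at h
    exact h
  have h1 : PySem.Str.pyGet? s ((k : Nat) : Int) = PySem.List.pyGet? s.toList ((k : Nat) : Int) := rfl
  rw [h1, PySem.List.pyGet?_natCast, List.getElem?_eq_getElem hk]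
  simp [pvOs]

/-- B's first-window accumulation computes the prefix sum and product. -/
lemma pvInit (s : String) :
    ∀ L, L ≤ s.toList.length →
    (List.range L).foldl
      (fun (w : Int × Int) (k : Nat) =>
        (w.1 + (((PySem.Str.pyGet? s ((k : Nat) : Int)).getD ' ').toNat : Int),
         w.2 * (((PySem.Str.pyGet? s ((k : Nat) : Int)).getD ' ').toNat : Int)))
      (0, 1)
    = (pvPS (pvOs s.toList) L, pvPP (pvOs s.toList) L) := by
  intro L
  induction L with
  | zero => intro _; simp [pvPS, pvPP]
  | succ L ih =>
    intro hL
    have hL' : L < (pvOs s.toList).length := by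
      rw [pvOs, List.length_map]
      omega
    rw [List.range_succ, List.foldl_append, ih (by omega), List.foldl_cons, List.foldl_nil]
    simp only [pvOrd s L hL']
    rw [pvPS_succ _ _ hL', pvPP_succ _ _ hL']

/-- Same, over the Python range of `Int` indices as B's port runs it. -/
lemma pvInit' (s : String) (d : Nat) (h : d + 1 ≤ s.toList.length) :
    (PySem.List.pyRange 0 (1 + (d : Int)) 1).foldl
      (fun (w : Int × Int) (k : Int) =>
        (w.1 + (((PySem.Str.pyGet? s k).getD ' ').toNat : Int),
         w.2 * (((PySem.Str.pyGet? s k).getD ' ').toNat : Int)))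
      (0, 1)
    = (pvPS (pvOs s.toList) (d + 1), pvPP (pvOs s.toList) (d + 1)) := by
  rw [show (1 : Int) + (d : Int) = ((d + 1 : Nat) : Int) from by push_cast; ring,
    PySem.List.pyRange_zero_natCast, List.foldl_map]
  exact pvInit s (d + 1) h

/-- B's sliding loop: the window signature is maintained exactly, and the dict/answer pair
    evolves by the online steps for the windows starting at 1 … m. -/
lemma pvInnerB (s : String) (hpos : ∀ x ∈ pvOs s.toList, 0 < x) (d : Nat)
    (p0 : PySem.Dict (Int × Int) Int × Int) :
    ∀ m, m + (d + 1) ≤ s.toList.length →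
    (PySem.List.pyRange 1 (((m : Nat) : Int) + 1) 1).foldl
      (fun (q : Int × Int × PySem.Dict (Int × Int) Int × Int) (start : Int) =>
        (q.1 + (((PySem.Str.pyGet? s (start + (1 + (d : Int)) - 1)).getD ' ').toNat : Int) - (((PySem.Str.pyGet? s (start - 1)).getD ' ').toNat : Int),
         PySem.Int.floordiv (q.2.1 * (((PySem.Str.pyGet? s (start + (1 + (d : Int)) - 1)).getD ' ').toNat : Int)) (((PySem.Str.pyGet? s (start - 1)).getD ' ').toNat : Int),
         q.2.2.1.insert (q.1 + (((PySem.Str.pyGet? s (start + (1 + (d : Int)) - 1)).getD ' ').toNat : Int) - (((PySem.Str.pyGet? s (start - 1)).getD ' ').toNat : Int), PySem.Int.floordiv (q.2.1 * (((PySem.Str.pyGet? s (start + (1 + (d : Int)) - 1)).getD ' ').toNat : Int)) (((PySem.Str.pyGet? s (start - 1)).getD ' ').toNat : Int)) (q.2.2.1.getD (q.1 + (((PySem.Str.pyGet? s (start + (1 + (d : Int)) - 1)).getD ' ').toNat : Int) - (((PySem.Str.pyGet? s (start - 1)).getD ' ').toNat : Int), PySem.Int.floordiv (q.2.1 * (((PySem.Str.pyGet?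 s (start + (1 + (d : Int)) - 1)).getD ' ').toNat : Int)) (((PySem.Str.pyGet? s (start - 1)).getD ' ').toNat : Int)) 0 + 1),
         q.2.2.2 + q.2.2.1.getD (q.1 + (((PySem.Str.pyGet? s (start + (1 + (d : Int)) - 1)).getD ' ').toNat : Int) - (((PySem.Str.pyGet? s (start - 1)).getD ' ').toNat : Int), PySem.Int.floordiv (q.2.1 * (((PySem.Str.pyGet? s (start + (1 + (d : Int)) - 1)).getD ' ').toNat : Int)) (((PySem.Str.pyGet? s (start - 1)).getD ' ').toNat : Int)) 0))
      (pvPS (pvOs s.toList) (d + 1), pvPP (pvOs s.toList) (d + 1), p0)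
    = (pvPS (pvOs s.toList) (m + d + 1) - pvPS (pvOs s.toList) m,
       pvPP (pvOs s.toList) (m + d + 1) / pvPP (pvOs s.toList) m,
       ((List.range m).map (fun t => pvKey (pvOs s.toList) (t + 1) (t + 1 + d))).foldl pvStepB p0) := by
  intro m
  induction m with
  | zero =>
    intro _
    have h0 : PySem.List.pyRange 1 (((0 : Nat) : Int) + 1) 1 = [] := by decide
    rw [h0, List.foldl_nil, Nat.zero_add]
    simp [pvPS, pvPP]
  | succ m ih =>
    intro hm
    have hcast : (((m + 1 : Nat) : Int) + 1) = (((m : Nat) : Int) + 1) + 1 := by push_cast; ring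
    rw [hcast, PySem.List.pyRange_one_succ_right (by omega), List.foldl_append,
      ih (by omega), List.foldl_cons, List.foldl_nil]
    have hidx1 : (((m : Nat) : Int) + 1) + (1 + (d : Int)) - 1 = ((m + d + 1 : Nat) : Int) := by
      push_cast
      ring
    have hidx2 : (((m : Nat) : Int) + 1) - 1 = ((m : Nat) : Int) := by ring
    have hm1 : m + d + 1 < (pvOs s.toList).length := by
      rw [pvOs, List.length_map]; omega
    have hm2 : m < (pvOs s.toList).length := by
      rw [pvOs, List.length_map]; omega
    simp only [hidx1, hidx2, pvOrd s (m + d + 1) hm1, pvOrd s m hm2]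
    have hsum : pvPS (pvOs s.toList) (m + d + 1) - pvPS (pvOs s.toList) m
          + (pvOs s.toList)[m + d + 1] - (pvOs s.toList)[m]
        = pvPS (pvOs s.toList) (m + 1 + d + 1) - pvPS (pvOs s.toList) (m + 1) := by
      rw [show m + 1 + d + 1 = (m + d + 1) + 1 from by omega, pvPS_succ _ (m + d + 1) hm1,
        pvPS_succ _ m hm2]
      ring
    have hprod : PySem.Int.floordiv
          (pvPP (pvOs s.toList) (m + d + 1) / pvPP (pvOs s.toList) m * (pvOs s.toList)[m + d + 1])
          (pvOs s.toList)[m]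
        = pvPP (pvOs s.toList) (m + 1 + d + 1) / pvPP (pvOs s.toList) (m + 1) := by
      rw [pvQuot_step _ hpos m (m + d + 1) (by omega) hm1,
        PySem.Int.floordiv_eq_ediv_of_pos (hpos _ (List.getElem_mem hm2)),
        pvQuot_shrink _ hpos m (m + d + 2) (by omega) hm2,
        show m + 1 + d + 1 = m + d + 2 from by omega]
    simp only [hsum, hprod]
    rw [List.range_succ, List.map_append, List.foldl_append, List.map_cons, List.map_nil,
      List.foldl_cons, List.foldl_nil]
    have hkey : pvKey (pvOs s.toList) (m + 1) (m + 1 + d)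
        = (pvPS (pvOs s.toList) (m + 1 + d + 1) - pvPS (pvOs s.toList) (m + 1),
           pvPP (pvOs s.toList) (m + 1 + d + 1) / pvPP (pvOs s.toList) (m + 1)) := rfl
    rw [hkey]
    rfl

lemma pvB_eq (s : String) (h : Dom_sherlockAndAnagrams s) :
    sherlockAndAnagrams_alt s = pvNN (pvKeys (pvOs s.toList) (pvPairsB s.toList.length)) := by
  have hpos := pvOs_pos s h
  have hcong : ∀ (p : PySem.Dict (Int × Int) Int × Int) (d : Nat), d ∈ List.range s.toList.length →
      (fun (st : PySem.Dict (Int × Int) Int × Int) (length : Int) =>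
        let w := (PySem.List.pyRange 0 length 1).foldl
          (fun (w : Int × Int) k =>
            let o : Int := (((PySem.Str.pyGet? s k).getD ' ').toNat : Int)
            (w.1 + o, w.2 * o)) (0, 1)
        let sig := (w.1, w.2)
        let answer := st.2 + st.1.getD sig 0
        let seen := st.1.insert sig (st.1.getD sig 0 + 1)
        let q :=
          (PySem.List.pyRange 1 (PySem.Str.len s - length + 1) 1).foldl
            (fun (q : Int × Int × PySem.Dict (Int × Int) Int × Int) start =>
              let oin : Int := (((PySem.Str.pyGet? s (start + length - 1)).getD ' ').toNat : Int)
              let oout : Int := (((PySem.Str.pyGet? s (start - 1)).getD ' ').toNat : Int)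
              let wsum := q.1 + oin - oout
              let wprod := PySem.Int.floordiv (q.2.1 * oin) oout
              let sig := (wsum, wprod)
              let answer := q.2.2.2 + q.2.2.1.getD sig 0
              let seen := q.2.2.1.insert sig (q.2.2.1.getD sig 0 + 1)
              (wsum, wprod, seen, answer))
            (w.1, w.2, seen, answer)
        (q.2.2.1, q.2.2.2)) p (1 + (d : Int))
      = ((List.range (s.toList.length - d)).map
          (fun st => pvKey (pvOs s.toList) st (st + d))).foldl pvStepB p := by
    intro p d hd
    have hd' : d < s.toList.length := List.mem_range.mp hd
    simp only [PySem.Str.len_eq]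
    rw [pvInit' s d (by omega)]
    simp only []
    rw [show ((s.toList.length : Nat) : Int) - (1 + (d : Int)) + 1
        = (((s.toList.length - d - 1 : Nat) : Int) + 1) from by omega]
    rw [pvInnerB s hpos d _ (s.toList.length - d - 1) (by omega)]
    simp only []
    have hrange : List.range (s.toList.length - d)
        = 0 :: (List.range (s.toList.length - d - 1)).map Nat.succ := by
      conv_lhs => rw [show s.toList.length - d = (s.toList.length - d - 1) + 1 from by omega]
      rw [List.range_succ_eq_map]
    rw [hrange, List.map_cons, List.foldl_cons, List.map_map]
    have hkey0 : pvKey (pvOs s.toList) 0 (0 + d)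
        = (pvPS (pvOs s.toList) (d + 1), pvPP (pvOs s.toList) (d + 1)) := by
      unfold pvKey
      rw [show (0 : Nat) + d = d from by omega, show pvPS (pvOs s.toList) 0 = 0 from rfl,
        show pvPP (pvOs s.toList) 0 = 1 from rfl, Int.ediv_one, sub_zero]
    have hmapeq : (List.map (fun t => pvKey (pvOs s.toList) (t + 1) (t + 1 + d))
          (List.range (s.toList.length - d - 1)))
        = List.map ((fun st => pvKey (pvOs s.toList) st (st + d)) ∘ Nat.succ)
            (List.range (s.toList.length - d - 1)) := by
      apply List.map_congr_left
      intro t _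
      rfl
    rw [← hmapeq, hkey0]
    rfl
  unfold sherlockAndAnagrams_alt
  simp only [PySem.Str.len_eq]
  rw [show PySem.List.pyRange 1 (((s.toList.length : Nat) : Int) + 1) 1
      = (List.range s.toList.length).map (fun (k : Nat) => 1 + (k : Int)) from by
        rw [PySem.List.pyRange_one,
          show (((s.toList.length : Nat) : Int) + 1 - 1).toNat = s.toList.length from by omega],
    List.foldl_map]
  refine Eq.trans (congrArg Prod.snd (PySem.List.foldl_congr_mem _ _
    (fun (p : PySem.Dict (Int × Int) Int × Int) (d : Nat) =>
      ((List.range (s.toList.length - d)).map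
        (fun st => pvKey (pvOs s.toList) st (st + d))).foldl pvStepB p)
    _ (fun acc x hx => hcong acc x hx))) ?_
  have hflat : (List.range s.toList.length).foldl
      (fun (p : PySem.Dict (Int × Int) Int × Int) (d : Nat) =>
        ((List.range (s.toList.length - d)).map
          (fun st => pvKey (pvOs s.toList) st (st + d))).foldl pvStepB p)
      (PySem.Dict.empty, 0)
      = (pvKeys (pvOs s.toList) (pvPairsB s.toList.length)).foldl pvStepB
          (PySem.Dict.empty, 0) := by
    rw [pvKeys, pvPairsB, List.map_flatMap, List.foldl_flatMap]
    apply PySem.List.foldl_congr_mem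
    intro p d _
    rw [List.map_map]
    rfl
  rw [hflat, pvOnl]
-- ===== VERDICT (by name: the statement is the Claim_ definition above) =====
theorem sherlockAndAnagrams_spec : Claim_equal_sherlockAndAnagrams := by
  intro s h
  unfold Spec_sherlockAndAnagrams
  rw [pvA_eq s h, pvB_eq s h]
  exact pvNN_perm (List.Perm.map _ (pvPairs_perm s.toList.length))
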